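-- pv_equiv track=rewrite | github.com/Kawser-nerd/CLCDSA | Source Codes/AtCoder/abc117/D/4980865.py | solve
-- ===== SOURCE A (Python) =====
-- def solve(N,K,A):
--     sum_per_digit_list = sum_digit(A)
--     K_b = to_2digit(K+1)
--     cand = []
--     for i in range(40):
--         if K_b[i] ==1:
--             cand.append(calc_opt(i,K_b,sum_per_digit_list,N))
--     return max(cand)
--
-- def calc_opt(i,K_b,sum_per_digit_list,N):
--     opt = 0
--     for j in range(40):
--         if j < i :
--             opt+= max(N-sum_per_digit_list[j], sum_per_digit_list[j]) * 2**j
--         elif j==i: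
--             opt+= sum_per_digit_list[j] * 2**j
--
--         else:
--             if K_b[j] == 1:
--                 opt+= (N - sum_per_digit_list[j]) * 2**j
--             else:
--                 opt+= sum_per_digit_list[j] * 2**j
--     return opt
--
-- def sum_digit(A):
--     sum_per_digit_list = []
--     numbers = list(A)
--     for i in range(40):
--         sum_per_digit_list.append(sum([number %2 for number in numbers]))
--         numbers = [number //2 for number in numbers]
--     return sum_per_digit_list
--
-- def to_2digit(number):
--     digits = []
--     for i in range(40):
--         digits.append(number %2)
--         number = number //2
--     return digits
-- ===== SOURCE B (Python) =====
-- def solve(N, K, A):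
--     # prefix/suffix-sum reformulation: direct bit extraction, O(40) candidate formula
--     s = [sum((a // (1 << j)) % 2 for a in A) for j in range(40)]
--     b = [((K + 1) // (1 << j)) % 2 for j in range(40)]
--     low = []           # low[i] = sum_{j<i} max(s[j], N-s[j]) * 2^j
--     acc = 0
--     for j in range(40):
--         low.append(acc)
--         acc += max(s[j], N - s[j]) * (1 << j)
--     high = [0]         # high[i] = sum_{j>=i} forced contribution; built back-to-front
--     for j in reversed(range(40)):
--         high = [high[0] + ((N - s[j]) if b[j] == 1 else s[j]) * (1 << j)] + high
--     return max(low[i] + s[i] * (1 << i) + high[i + 1] for i in range(40) if b[i] == 1)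
-- ===== Notes on version B (the rewrite author's own statement) =====
-- stated objective: alternative
-- what changed: Replaces A's per-candidate recomputation (calc_opt re-sums all 40 bit positions for every set bit of K+1) with precomputed prefix ('low') and suffix ('high') partial-sum arrays giving an O(1) formula per candidate, and extracts bit j directly as a // 2**j % 2 instead of A's repeated halving of the whole list.
import Mathlib
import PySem

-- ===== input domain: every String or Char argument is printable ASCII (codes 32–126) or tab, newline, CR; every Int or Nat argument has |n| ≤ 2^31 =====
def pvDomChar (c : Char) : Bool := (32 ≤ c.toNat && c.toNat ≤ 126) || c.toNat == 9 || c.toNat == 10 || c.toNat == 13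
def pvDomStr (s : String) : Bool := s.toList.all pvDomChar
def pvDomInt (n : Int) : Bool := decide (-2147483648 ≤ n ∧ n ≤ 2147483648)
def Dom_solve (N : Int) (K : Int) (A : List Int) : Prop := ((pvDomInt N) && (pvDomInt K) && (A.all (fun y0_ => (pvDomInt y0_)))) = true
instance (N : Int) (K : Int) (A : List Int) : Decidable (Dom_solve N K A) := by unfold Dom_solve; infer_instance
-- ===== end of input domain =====

-- B replaces A's per-candidate 40-term re-summation (calc_opt for every set bit of K+1) by prefix/suffix
-- partial-sum arrays and direct bit extraction a // 2**j % 2, giving an O(1) candidate formula (objective: alternative).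

-- ===== PORT A =====
-- sum_digit: 40 rounds, each appends the sum of the current parities then halves every number
def solve_sumDigit (A : List Int) : List Int :=
  ((List.range 40).foldl
    (fun (st : List Int × List Int) _ =>
      (st.1 ++ [(st.2.map (fun n => PySem.Int.mod n 2)).sum],
       st.2.map (fun n => PySem.Int.floordiv n 2)))
    ([], A)).1

-- to_2digit: low 40 bits of `number`, low bit first
def solve_to2digit (number : Int) : List Int :=
  ((List.range 40).foldl
    (fun (st : List Int × Int) _ =>
      (st.1 ++ [PySem.Int.mod st.2 2], PySem.Int.floordiv st.2 2))
    ([], number)).1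

-- calc_opt: indices j are range(40) and both lists have length 40, so list.getD is exact here
def solve_calcOpt (i : Nat) (Kb : List Int) (s : List Int) (N : Int) : Int :=
  (List.range 40).foldl
    (fun opt j =>
      if j < i then opt + max (N - s.getD j 0) (s.getD j 0) * 2 ^ j
      else if j = i then opt + s.getD j 0 * 2 ^ j
      else if Kb.getD j 0 = 1 then opt + (N - s.getD j 0) * 2 ^ j
      else opt + s.getD j 0 * 2 ^ j)
    0

def solve (N : Int) (K : Int) (A : List Int) : Int :=
  let s := solve_sumDigit A
  let Kb := solve_to2digit (K + 1)
  let cand := (List.range 40).foldl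
    (fun c i => if Kb.getD i 0 = 1 then c ++ [solve_calcOpt i Kb s N] else c) []
  match PySem.List.max? cand (fun x => x) with
  | some v => v
  | none => 0   -- Python raises ValueError (max of empty list) here; excluded by Pre_solve

-- ===== PORT B =====
def solve_alt (N : Int) (K : Int) (A : List Int) : Int :=
  -- bit j of a is a // 2**j % 2, extracted directly
  let s := (List.range 40).map
    (fun j => (A.map (fun a => PySem.Int.mod (PySem.Int.floordiv a (2 ^ j)) 2)).sum)
  let b := (List.range 40).map
    (fun j => PySem.Int.mod (PySem.Int.floordiv (K + 1) (2 ^ j)) 2)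
  -- low[i] = best total of the free bit positions below i (running prefix sum)
  let low := ((List.range 40).foldl
    (fun (st : List Int × Int) j =>
      (st.1 ++ [st.2], st.2 + max (s.getD j 0) (N - s.getD j 0) * 2 ^ j))
    ([], 0)).1
  -- high[t] = forced total of the bit positions ≥ t, built back-to-front
  let high := (List.range 40).reverse.foldl
    (fun (h : List Int) j =>
      (h.headD 0 + (if b.getD j 0 = 1 then N - s.getD j 0 else s.getD j 0) * 2 ^ j) :: h)
    [0]
  let cands := ((List.range 40).filter (fun i => decide (b.getD i 0 = 1))).map
    (fun i => low.getD i 0 + s.getD i 0 * 2 ^ i + high.getD (i + 1) 0)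
  match PySem.List.max? cands (fun x => x) with
  | some v => v
  | none => 0   -- Python raises ValueError (max of empty generator) here; excluded by Pre_solve

-- ===== PRECONDITION & SPEC =====
-- Pre_ excludes exactly the inputs where both Pythons raise ValueError (max of nothing):
-- K+1 ≡ 0 (mod 2^40), i.e. K+1 has no set bit among its low 40 bits (within Dom only K = -1).
def Pre_solve (N : Int) (K : Int) (A : List Int) : Prop := PySem.Int.mod (K + 1) (2 ^ 40) ≠ 0
instance (N : Int) (K : Int) (A : List Int) : Decidable (Pre_solve N K A) := by unfold Pre_solve; infer_instance
def pvWitness_solve : Int × Int × List Int := (2, 3, [1, 2])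

def Spec_solve (N : Int) (K : Int) (A : List Int) (out : Int) : Prop := out = solve_alt N K A
instance (N : Int) (K : Int) (A : List Int) (out : Int) : Decidable (Spec_solve N K A out) := by unfold Spec_solve; infer_instance

-- ===== CLAIM (what is proved, stated in full; the proofs are below) =====
def Claim_equal_solve : Prop := ∀ (N : Int) (K : Int) (A : List Int), Dom_solve N K A → Pre_solve N K A → Spec_solve N K A (solve N K A)

-- ===== LEMMAS AND PROOFS =====

-- generic shape of sum_digit / to_2digit: append f of the state, then step the state with g
theorem pvFoldAppendStep {σ α : Type} (f : σ → α) (g : σ → σ) (n : Nat) :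
    ∀ (acc : List α) (x : σ),
    (List.range n).foldl (fun (st : List α × σ) _ => (st.1 ++ [f st.2], g st.2)) (acc, x)
      = (acc ++ (List.range n).map (fun j => f (g^[j] x)), g^[n] x) := by
  induction n with
  | zero => intro acc x; simp
  | succ n ih =>
    intro acc x
    rw [List.range_succ, List.foldl_append, ih, List.map_append]
    simp [Function.iterate_succ_apply']

theorem pvMapIterate {α : Type} (g : α → α) (j : Nat) (l : List α) :
    (List.map g)^[j] l = l.map g^[j] := by
  induction j with
  | zero => simp
  | succ j ih =>
    rw [Function.iterate_succ_apply', ih, List.map_map]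
    exact List.map_congr_left (fun a _ => (Function.iterate_succ_apply' g j a).symm)

theorem pvIterHalve (j : Nat) (x : Int) :
    (fun a => PySem.Int.floordiv a 2)^[j] x = PySem.Int.floordiv x (2 ^ j) := by
  induction j generalizing x with
  | zero => simp [PySem.Int.floordiv_eq_ediv_of_pos]
  | succ j ih =>
    rw [Function.iterate_succ_apply', ih,
      PySem.Int.floordiv_eq_ediv_of_pos (a := x) (by positivity),
      PySem.Int.floordiv_eq_ediv_of_pos (by omega : (0:Int) < 2),
      PySem.Int.floordiv_eq_ediv_of_pos (a := x) (by positivity),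
      Int.ediv_ediv_of_nonneg (by positivity), pow_succ]

-- A's sum_digit produces exactly B's direct-bit-extraction list
theorem pvSumDigitEq (A : List Int) :
    solve_sumDigit A
      = (List.range 40).map
          (fun j => (A.map (fun a => PySem.Int.mod (PySem.Int.floordiv a (2 ^ j)) 2)).sum) := by
  unfold solve_sumDigit
  rw [pvFoldAppendStep (fun (y : List Int) => (y.map (fun n => PySem.Int.mod n 2)).sum)
    (List.map (fun n => PySem.Int.floordiv n 2)) 40 [] A]
  simp only [List.nil_append]
  refine List.map_congr_left (fun j _ => ?_)
  rw [pvMapIterate, List.map_map]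
  refine congrArg List.sum (List.map_congr_left (fun a _ => ?_))
  rw [Function.comp_apply, pvIterHalve]

-- A's to_2digit produces exactly B's bit list of K+1
theorem pvTo2digitEq (x : Int) :
    solve_to2digit x
      = (List.range 40).map (fun j => PySem.Int.mod (PySem.Int.floordiv x (2 ^ j)) 2) := by
  unfold solve_to2digit
  rw [pvFoldAppendStep (fun (y : Int) => PySem.Int.mod y 2) (fun y => PySem.Int.floordiv y 2) 40 [] x]
  simp only [List.nil_append]
  exact List.map_congr_left (fun j _ => by rw [pvIterHalve])

-- B's low loop: the accumulator list is the prefix sums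
theorem pvLowFold (g : Nat → Int) (n : Nat) :
    ∀ (acc : List Int) (c : Int),
    (List.range n).foldl (fun (st : List Int × Int) j => (st.1 ++ [st.2], st.2 + g j)) (acc, c)
      = (acc ++ (List.range n).map (fun i => c + ((List.range i).map g).sum),
         c + ((List.range n).map g).sum) := by
  induction n with
  | zero => intro acc c; simp
  | succ n ih =>
    intro acc c
    rw [List.range_succ, List.foldl_append, ih]
    simp [List.map_append, add_assoc]

-- sum of g over [t, t+k)
def pvHsum (g : Nat → Int) (t k : Nat) : Int := ((List.range' t k).map g).sum

-- B's high loop: back-to-front suffix sums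
theorem pvHighFold (g : Nat → Int) (k : Nat) :
    ∀ (a : Nat) (h0 : List Int),
    (List.range' a k).reverse.foldl (fun (h : List Int) j => (h.headD 0 + g j) :: h) h0
      = (List.range' a k).map (fun t => pvHsum g t (a + k - t) + h0.headD 0) ++ h0 := by
  induction k with
  | zero => intro a h0; simp
  | succ k ih =>
    intro a h0
    conv_lhs => rw [List.range'_succ]
    rw [List.reverse_cons, List.foldl_append, ih (a+1) h0]
    have hhead :
        ((List.range' (a+1) k).map (fun t => pvHsum g t (a + 1 + k - t) + h0.headD 0) ++ h0).headD 0
          = pvHsum g (a+1) k + h0.headD 0 := by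
      cases k with
      | zero => simp [pvHsum]
      | succ k => simp [pvHsum, List.range'_succ]
    simp only [List.foldl_cons, List.foldl_nil, hhead]
    conv_rhs => rw [List.range'_succ]
    rw [List.map_cons, List.cons_append]
    congr 1
    · have h40 : a + (k + 1) - a = k + 1 := by omega
      rw [h40]
      simp only [pvHsum, List.range'_succ, List.map_cons, List.sum_cons]
      ring
    · congr 1
      refine List.map_congr_left (fun t ht => ?_)
      have he : a + 1 + k - t = a + (k + 1) - t := by omega
      rw [he]

-- calc_opt's loop is a sum of per-position terms
theorem pvCalcOptSum (i : Nat) (Kb s : List Int) (N : Int) :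
    solve_calcOpt i Kb s N
      = ((List.range 40).map (fun j =>
          if j < i then max (N - s.getD j 0) (s.getD j 0) * 2 ^ j
          else if j = i then s.getD j 0 * 2 ^ j
          else if Kb.getD j 0 = 1 then (N - s.getD j 0) * 2 ^ j
          else s.getD j 0 * 2 ^ j)).sum := by
  unfold solve_calcOpt
  have hcongr := PySem.List.foldl_congr_mem
    (l := List.range 40) (init := (0 : Int))
    (f := fun opt j =>
      if j < i then opt + max (N - s.getD j 0) (s.getD j 0) * 2 ^ j
      else if j = i then opt + s.getD j 0 * 2 ^ j
      else if Kb.getD j 0 = 1 then opt + (N - s.getD j 0) * 2 ^ j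
      else opt + s.getD j 0 * 2 ^ j)
    (g := fun opt j => opt +
      (if j < i then max (N - s.getD j 0) (s.getD j 0) * 2 ^ j
       else if j = i then s.getD j 0 * 2 ^ j
       else if Kb.getD j 0 = 1 then (N - s.getD j 0) * 2 ^ j
       else s.getD j 0 * 2 ^ j))
    (by intro acc x _; dsimp only; split_ifs <;> rfl)
  rw [hcongr, PySem.List.foldl_add]
  simp

-- the candidate value, as a function of the per-position data
def pvCand (S B : Nat → Int) (N : Int) (i : Nat) : Int :=
  ((List.range i).map (fun j => max (S j) (N - S j) * 2 ^ j)).sum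
    + S i * 2 ^ i
    + pvHsum (fun j => (if B j = 1 then N - S j else S j) * 2 ^ j) (i + 1) (39 - i)

-- calc_opt over the two (range 40).map lists equals the closed candidate formula
theorem pvCalcOptEq (S B : Nat → Int) (N : Int) (i : Nat) (hi : i < 40) :
    solve_calcOpt i ((List.range 40).map B) ((List.range 40).map S) N = pvCand S B N i := by
  rw [pvCalcOptSum]
  -- first replace every list lookup by the generating function, per element
  rw [List.map_congr_left (l := List.range 40)
    (g := fun j =>
      if j < i then max (N - S j) (S j) * 2 ^ j
      else if j = i then S j * 2 ^ j
      else if B j = 1 then (N - S j) * 2 ^ j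
      else S j * 2 ^ j)
    (by
      intro j hj
      have hj40 : j < 40 := List.mem_range.mp hj
      rw [PySem.List.getD_map_range S 40 j 0 hj40, PySem.List.getD_map_range B 40 j 0 hj40])]
  -- now split the summation range at i
  have hsplit : List.range 40 = List.range' 0 i ++ List.range' i 1 ++ List.range' (i+1) (39-i) := by
    rw [List.range_eq_range']
    have h1 := List.range'_append (s := 0) (m := i) (n := 40 - i) (step := 1)
    simp only [Nat.one_mul, Nat.zero_add] at h1
    have h2 := List.range'_append (s := i) (m := 1) (n := 39 - i) (step := 1)
    simp only [Nat.one_mul] at h2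
    rw [show (1 + (39 - i)) = 40 - i from by omega] at h2
    rw [List.append_assoc, h2, h1]
    congr 1
    omega
  rw [hsplit]
  simp only [List.map_append, List.sum_append]
  unfold pvCand
  congr 1
  · congr 1
    · rw [← List.range_eq_range']
      refine congrArg List.sum (List.map_congr_left (fun j hj => ?_))
      have hj' : j < i := List.mem_range.mp hj
      rw [if_pos hj']
      rw [max_comm]
    · simp
  · unfold pvHsum
    refine congrArg List.sum (List.map_congr_left (fun j hj => ?_))
    have hj' : i + 1 ≤ j ∧ j < i + 1 + (39 - i) := by
      have := List.mem_range'_1.mp hj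
      omega
    rw [if_neg (by omega), if_neg (by omega)]
    split_ifs <;> ring

-- both ports build the same candidate list, element by element
set_option maxHeartbeats 1000000 in
theorem pvCandListEq (S B : Nat → Int) (N : Int) :
    (List.range 40).foldl
      (fun c i => if ((List.range 40).map B).getD i 0 = 1
        then c ++ [solve_calcOpt i ((List.range 40).map B) ((List.range 40).map S) N] else c) []
    = ((List.range 40).filter (fun i => decide (((List.range 40).map B).getD i 0 = 1))).map
        (fun i =>
          (((List.range 40).foldl
            (fun (st : List Int × Int) j =>
              (st.1 ++ [st.2],
               st.2 + max (((List.range 40).map S).getD j 0)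
                 (N - ((List.range 40).map S).getD j 0) * 2 ^ j)) ([], 0)).1).getD i 0
          + ((List.range 40).map S).getD i 0 * 2 ^ i
          + ((List.range 40).reverse.foldl
              (fun (h : List Int) j =>
                (h.headD 0 + (if ((List.range 40).map B).getD j 0 = 1
                  then N - ((List.range 40).map S).getD j 0
                  else ((List.range 40).map S).getD j 0) * 2 ^ j) :: h)
              [0]).getD (i + 1) 0) := by
  rw [PySem.List.foldl_append_ite (fun i => ((List.range 40).map B).getD i 0 = 1)
    (fun i => solve_calcOpt i ((List.range 40).map B) ((List.range 40).map S) N)]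
  rw [List.nil_append]
  -- characterise B's low list once
  have hlow : ((List.range 40).foldl
      (fun (st : List Int × Int) j =>
        (st.1 ++ [st.2],
         st.2 + max (((List.range 40).map S).getD j 0)
           (N - ((List.range 40).map S).getD j 0) * 2 ^ j)) ([], 0)).1
      = (List.range 40).map (fun t => (0 : Int) + ((List.range t).map
          (fun j => max (S j) (N - S j) * 2 ^ j)).sum) := by
    have hc := PySem.List.foldl_congr_mem
      (l := List.range 40) (init := (([] : List Int), (0 : Int)))
      (f := fun (st : List Int × Int) j =>
        (st.1 ++ [st.2],
         st.2 + max (((List.range 40).map S).getD j 0)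
           (N - ((List.range 40).map S).getD j 0) * 2 ^ j))
      (g := fun (st : List Int × Int) j =>
        (st.1 ++ [st.2], st.2 + max (S j) (N - S j) * 2 ^ j))
      (by
        intro acc j hj
        dsimp only
        rw [PySem.List.getD_map_range S 40 j 0 (List.mem_range.mp hj)])
    rw [hc, pvLowFold (fun j => max (S j) (N - S j) * 2 ^ j) 40 [] 0, List.nil_append]
  -- characterise B's high list once
  have hhigh : (List.range 40).reverse.foldl
      (fun (h : List Int) j =>
        (h.headD 0 + (if ((List.range 40).map B).getD j 0 = 1
          then N - ((List.range 40).map S).getD j 0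
          else ((List.range 40).map S).getD j 0) * 2 ^ j) :: h) [0]
      = (List.range' 0 40).map (fun t =>
          pvHsum (fun j => (if B j = 1 then N - S j else S j) * 2 ^ j) t (0 + 40 - t)
            + ([(0 : Int)].headD 0)) ++ [0] := by
    have hc := PySem.List.foldl_congr_mem
      (l := (List.range 40).reverse) (init := ([(0 : Int)]))
      (f := fun (h : List Int) j =>
        (h.headD 0 + (if ((List.range 40).map B).getD j 0 = 1
          then N - ((List.range 40).map S).getD j 0
          else ((List.range 40).map S).getD j 0) * 2 ^ j) :: h)
      (g := fun (h : List Int) j =>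
        (h.headD 0 + (if B j = 1 then N - S j else S j) * 2 ^ j) :: h)
      (by
        intro acc j hj
        have hj40 : j < 40 := List.mem_range.mp (List.mem_reverse.mp hj)
        dsimp only
        rw [PySem.List.getD_map_range B 40 j 0 hj40, PySem.List.getD_map_range S 40 j 0 hj40])
    rw [hc]
    have hrev : (List.range 40).reverse = (List.range' 0 40).reverse := by
      rw [List.range_eq_range']
    rw [hrev, pvHighFold (fun j => (if B j = 1 then N - S j else S j) * 2 ^ j) 40 0 [0]]
  refine List.map_congr_left (fun i hi => ?_)
  have hi40 : i < 40 := List.mem_range.mp (List.mem_of_mem_filter hi)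
  rw [hlow, hhigh, pvCalcOptEq S B N i hi40]
  have hA : ((List.range 40).map (fun t => (0 : Int) + ((List.range t).map
        (fun j => max (S j) (N - S j) * 2 ^ j)).sum)).getD i 0
      = 0 + ((List.range i).map (fun j => max (S j) (N - S j) * 2 ^ j)).sum :=
    PySem.List.getD_map_range _ 40 i 0 hi40
  have hB : ((List.range 40).map S).getD i 0 = S i := PySem.List.getD_map_range S 40 i 0 hi40
  have hC : (((List.range' 0 40).map (fun t =>
        pvHsum (fun j => (if B j = 1 then N - S j else S j) * 2 ^ j) t (0 + 40 - t)
          + ([(0 : Int)].headD 0))) ++ [0]).getD (i + 1) 0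
      = pvHsum (fun j => (if B j = 1 then N - S j else S j) * 2 ^ j) (i + 1) (39 - i) := by
    rw [← List.range_eq_range']
    by_cases hcase : i + 1 < 40
    · rw [List.getD_append _ _ 0 (i + 1) (by simpa using hcase)]
      rw [PySem.List.getD_map_range _ 40 (i + 1) 0 hcase]
      rw [show 0 + 40 - (i + 1) = 39 - i from by omega]
      simp
    · have hieq : i = 39 := by omega
      subst hieq
      rw [List.getD_append_right _ _ 0 40 (by simp)]
      simp [pvHsum]
  rw [hA, hB, hC]
  unfold pvCand
  ring

-- the main structural lemma: with s and Kb rewritten, solve computes solve_alt's expression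
set_option maxHeartbeats 1000000 in
theorem pvSolveEqAlt (N K : Int) (A : List Int) : solve N K A = solve_alt N K A := by
  unfold solve solve_alt
  rw [pvSumDigitEq, pvTo2digitEq]
  dsimp only
  rw [pvCandListEq (fun j => (A.map (fun a => PySem.Int.mod (PySem.Int.floordiv a (2 ^ j)) 2)).sum)
    (fun j => PySem.Int.mod (PySem.Int.floordiv (K + 1) (2 ^ j)) 2) N]

-- ===== VERDICT (by name: the statement is the Claim_ definition above) =====
theorem solve_spec : Claim_equal_solve := by
  intro N K A _ _
  unfold Spec_solve
  exact pvSolveEqAlt N K A
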